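-- pv_equiv track=rewrite | github.com/coutego/advent-of-code-2022 | src/aoc22.py | calories
-- ===== SOURCE A (Python) =====
-- from typing import Callable, List, Tuple, Optional, Any
--
-- def calories(nums: List[Optional[int]]) -> List[int]:
--     ret = []
--     acc = 0
--     for c in nums:
--         if c == None:
--             ret.append(acc)
--             acc = 0
--         else:
--             acc += c
--     if acc > 0:
--         ret.append(acc)
--     return ret
-- ===== SOURCE B (Python) =====
-- def calories(nums):
--     # Split into groups of consecutive non-None values, sum each group,
--     # and keep the trailing sum only if strictly positive.
--     groups = [[]]
--     for c in nums:
--         if c is None: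
--             groups.append([])
--         else:
--             groups[-1].append(c)
--     sums = [sum(g) for g in groups]
--     last = sums.pop()
--     if last > 0:
--         sums.append(last)
--     return sums
-- ===== Notes on version B (the rewrite author's own statement) =====
-- stated objective: alternative
-- what changed: B partitions the list into sublists at each None (group-then-sum decomposition: build groups, map sum over them, then pop the trailing sum and re-append it only if positive), instead of A's single running-accumulator loop.
import Mathlib
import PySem

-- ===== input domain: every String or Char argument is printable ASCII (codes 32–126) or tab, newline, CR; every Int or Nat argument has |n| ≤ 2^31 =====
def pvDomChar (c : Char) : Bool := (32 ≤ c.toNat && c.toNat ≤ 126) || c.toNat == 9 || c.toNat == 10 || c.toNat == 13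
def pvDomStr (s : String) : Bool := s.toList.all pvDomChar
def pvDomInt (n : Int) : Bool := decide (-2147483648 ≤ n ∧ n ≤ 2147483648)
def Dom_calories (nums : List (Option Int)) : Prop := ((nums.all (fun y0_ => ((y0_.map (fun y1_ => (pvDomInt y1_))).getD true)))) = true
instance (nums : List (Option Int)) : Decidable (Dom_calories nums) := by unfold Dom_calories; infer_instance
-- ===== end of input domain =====

-- B replaces A's running-accumulator loop by a group-then-sum decomposition (objective: alternative, same cost).

-- ===== PORT A =====
-- A: one pass with accumulator acc, appending acc at each None, and the final acc if > 0.
def caloriesStep (s : List Int × Int) (c : Option Int) : List Int × Int :=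
  match c with
  | none => (s.1 ++ [s.2], 0)
  | some v => (s.1, s.2 + v)

def calories (nums : List (Option Int)) : List Int :=
  let s := nums.foldl caloriesStep ([], 0)
  if s.2 > 0 then s.1 ++ [s.2] else s.1

-- ===== PORT B =====
-- B: partition into groups at each None (groups[-1].append / append new empty group),
-- map sum over the groups, pop the last sum and re-append it only if > 0.
def caloriesGroupStep (groups : List (List Int)) (c : Option Int) : List (List Int) :=
  match c with
  | none => groups ++ [[]]
  | some v => groups.dropLast ++ [(groups.getLast?.getD []) ++ [v]]

def calories_alt (nums : List (Option Int)) : List Int :=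
  let groups := nums.foldl caloriesGroupStep [[]]
  let sums := groups.map List.sum
  let last := (sums.getLast?.getD 0)   -- sums.pop(): sums is nonempty since groups starts with one group
  let rest := sums.dropLast
  if last > 0 then rest ++ [last] else rest

-- ===== PRECONDITION & SPEC =====
def Spec_calories (nums : List (Option Int)) (out : List Int) : Prop := out = calories_alt nums
instance (nums : List (Option Int)) (out : List Int) : Decidable (Spec_calories nums out) := by unfold Spec_calories; infer_instance

-- ===== CLAIM (what is proved, stated in full; the proofs are below) =====
def Claim_equal_calories : Prop := ∀ (nums : List (Option Int)), Dom_calories nums → Spec_calories nums (calories nums)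

-- ===== LEMMAS AND PROOFS =====

-- State correspondence: A's (ret, acc) is (map sum of the finished groups, sum of the open group).
lemma calories_fold_corr : ∀ (nums : List (Option Int)) (gs : List (List Int)) (g : List Int),
    ∃ gs' g', nums.foldl caloriesGroupStep (gs ++ [g]) = gs' ++ [g'] ∧
      nums.foldl caloriesStep (gs.map List.sum, g.sum) = (gs'.map List.sum, g'.sum) := by
  intro nums
  induction nums with
  | nil => intro gs g; exact ⟨gs, g, rfl, rfl⟩
  | cons c rest ih =>
    intro gs g
    cases c with
    | none =>
      obtain ⟨gs', g', h1, h2⟩ := ih (gs ++ [g]) []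
      refine ⟨gs', g', ?_, ?_⟩
      · simpa [caloriesGroupStep] using h1
      · simpa [caloriesStep] using h2
    | some v =>
      obtain ⟨gs', g', h1, h2⟩ := ih gs (g ++ [v])
      refine ⟨gs', g', ?_, ?_⟩
      · simpa [caloriesGroupStep] using h1
      · simpa [caloriesStep, add_comm] using h2

-- ===== VERDICT (by name: the statement is the Claim_ definition above) =====
theorem calories_spec : Claim_equal_calories := by
  intro nums _
  unfold Spec_calories calories calories_alt
  obtain ⟨gs', g', h1, h2⟩ := calories_fold_corr nums [] []
  simp only [List.nil_append] at h1
  simp only [List.map_nil, List.sum_nil] at h2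
  simp [h1, h2]
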